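-- pv_equiv track=rewrite | github.com/salmabellaou-max/Final_Project | evaluation.py | classify_fsa
-- ===== SOURCE A (Python) =====
-- from typing import List, Dict, Tuple
--
-- def classify_fsa(sequence: List[str]) -> str:
--     """
--     Finite State Automaton (no stack memory).
--     Limited to regular patterns.
--     """
--     # FSA without stack cannot properly track context
--     # This will fail on patterns requiring memory
--
--     state = "START"
--     pr_long_seen = 0
--     consecutive_p = 0
--
--     for symbol in sequence:
--         if symbol == "P":
--             consecutive_p += 1
--         elif symbol == "R":
--             consecutive_p = 0
--         elif symbol == "PRlong":
--             pr_long_seen += 1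
--         elif symbol == "PRincrease":
--             # FSA cannot properly track progression
--             return "mobitz_i"
--
--     # Without stack, cannot accurately classify
--     if pr_long_seen >= 3:
--         return "first_degree"
--     elif consecutive_p >= 2:
--         return "mobitz_ii"  # Might confuse with third-degree
--     else:
--         return "normal"
-- ===== SOURCE B (Python) =====
-- def classify_fsa(sequence):
--     if "PRincrease" in sequence:
--         return "mobitz_i"
--     if sequence.count("PRlong") >= 3:
--         return "first_degree"
--     trailing = 0
--     for symbol in reversed(sequence):
--         if symbol == "P":
--             trailing += 1
--         elif symbol == "R":
--             break
--     if trailing >= 2: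
--         return "mobitz_ii"
--     return "normal"
-- ===== Notes on version B (the rewrite author's own statement) =====
-- stated objective: simpler
-- what changed: Replaces the single forward state-machine loop with three independent steps: an early membership test for PRincrease, a count() of PRlong, and a reverse scan counting trailing P's that stops at the first R.
import Mathlib
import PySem

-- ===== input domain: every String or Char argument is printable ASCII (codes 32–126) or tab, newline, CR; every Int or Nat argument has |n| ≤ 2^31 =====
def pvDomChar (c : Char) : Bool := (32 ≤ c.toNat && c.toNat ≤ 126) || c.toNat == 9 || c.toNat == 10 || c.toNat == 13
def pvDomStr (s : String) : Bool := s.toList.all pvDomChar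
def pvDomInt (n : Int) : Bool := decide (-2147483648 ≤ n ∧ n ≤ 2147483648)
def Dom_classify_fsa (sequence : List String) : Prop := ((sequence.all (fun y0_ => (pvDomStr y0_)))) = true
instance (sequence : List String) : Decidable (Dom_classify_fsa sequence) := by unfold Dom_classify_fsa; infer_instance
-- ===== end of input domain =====

-- B replaces the single forward state-machine loop with a membership test, a count, and a
-- reverse scan for trailing P's (objective: simpler decomposition; same O(n) cost).

-- ===== PORT A =====
-- the forward loop with state (pr_long_seen, consecutive_p) and the early return on "PRincrease",
-- followed by A's decision chain at the end of the sequence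
def classifyLoopA : List String → Int → Int → String
  | [], pr_long_seen, consecutive_p =>
      if pr_long_seen ≥ 3 then "first_degree"
      else if consecutive_p ≥ 2 then "mobitz_ii"
      else "normal"
  | symbol :: rest, pr_long_seen, consecutive_p =>
      if symbol = "P" then classifyLoopA rest pr_long_seen (consecutive_p + 1)
      else if symbol = "R" then classifyLoopA rest pr_long_seen 0
      else if symbol = "PRlong" then classifyLoopA rest (pr_long_seen + 1) consecutive_p
      else if symbol = "PRincrease" then "mobitz_i"
      else classifyLoopA rest pr_long_seen consecutive_p

def classify_fsa (sequence : List String) : String :=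
  classifyLoopA sequence 0 0

-- ===== PORT B =====
-- the reverse scan: count consecutive "P" from the end, break at the first "R"
def trailingP : List String → Int → Int
  | [], trailing => trailing
  | symbol :: rest, trailing =>
      if symbol = "P" then trailingP rest (trailing + 1)
      else if symbol = "R" then trailing
      else trailingP rest trailing

def classify_fsa_alt (sequence : List String) : String :=
  if sequence.contains "PRincrease" then "mobitz_i"
  else if (PySem.List.count sequence "PRlong" : Int) ≥ 3 then "first_degree"
  else if trailingP sequence.reverse 0 ≥ 2 then "mobitz_ii"
  else "normal"

-- ===== PRECONDITION & SPEC =====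
def Spec_classify_fsa (sequence : List String) (out : String) : Prop := out = classify_fsa_alt sequence
instance (sequence : List String) (out : String) : Decidable (Spec_classify_fsa sequence out) := by unfold Spec_classify_fsa; infer_instance

-- ===== CLAIM (what is proved, stated in full; the proofs are below) =====
def Claim_equal_classify_fsa : Prop := ∀ (sequence : List String), Dom_classify_fsa sequence → Spec_classify_fsa sequence (classify_fsa sequence)

-- ===== LEMMAS AND PROOFS =====

-- trailingP is linear in its accumulator
theorem trailingP_acc (xs : List String) (a b : Int) :
    trailingP xs (a + b) = trailingP xs a + b := by
  induction xs generalizing a with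
  | nil => simp [trailingP]
  | cons s rest ih =>
    by_cases hp : s = "P"
    · simp only [trailingP, if_pos hp]
      have : a + b + 1 = (a + 1) + b := by ring
      rw [this, ih]
    · by_cases hr : s = "R" <;> simp [trailingP, hp, hr, ih]

-- the forward consecutive_p fold of A
def fwdP : List String → Int → Int
  | [], cp => cp
  | s :: rest, cp =>
      fwdP rest (if s = "P" then cp + 1 else if s = "R" then 0 else cp)

theorem fwdP_append (t : List String) (s : String) (c : Int) :
    fwdP (t ++ [s]) c =
      (if s = "P" then fwdP t c + 1 else if s = "R" then 0 else fwdP t c) := by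
  induction t generalizing c with
  | nil => by_cases hp : s = "P" <;> by_cases hr : s = "R" <;> simp_all [fwdP]
  | cons x xs ih => simp [fwdP, ih]

theorem fwdP_eq_trailingP (xs : List String) (cp : Int) :
    fwdP xs cp = trailingP xs.reverse 0 + (if "R" ∈ xs then 0 else cp) := by
  induction xs using List.reverseRecOn generalizing cp with
  | nil => simp [fwdP, trailingP]
  | append_singleton t s ih =>
    rw [fwdP_append, List.reverse_append]
    by_cases hp : s = "P"
    · have h1 : trailingP t.reverse 1 = trailingP t.reverse 0 + 1 := by
        have := trailingP_acc t.reverse 0 1; simpa using this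
      simp only [hp, if_pos, List.mem_append, List.mem_singleton, ih,
        List.reverse_nil, List.nil_append, List.cons_append, List.singleton_append, List.reverse_singleton,
        trailingP, if_neg (by decide : ¬("P" = "R")), if_pos (rfl : "P" = "P")]
      rw [zero_add, h1]
      by_cases hm : "R" ∈ t <;> simp [hm] <;> ring
    · by_cases hr : s = "R"
      · simp [hp, hr, trailingP, ih]
      · have hRs : ¬("R" = s) := fun h => hr h.symm
        simp [hp, hr, trailingP, ih, hRs]

-- A's loop, when "PRincrease" never occurs, computes the three pieces B computes
theorem loopA_no_inc (xs : List String) (pr cp : Int) (h : "PRincrease" ∉ xs) :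
    classifyLoopA xs pr cp =
      (if pr + (xs.count "PRlong" : Int) ≥ 3 then "first_degree"
       else if fwdP xs cp ≥ 2 then "mobitz_ii"
       else "normal") := by
  induction xs generalizing pr cp with
  | nil => simp [classifyLoopA, fwdP]
  | cons s rest ih =>
    have hs : s ≠ "PRincrease" := fun hh => h (hh ▸ List.mem_cons_self ..)
    have hrest : "PRincrease" ∉ rest := fun hh => h (List.mem_cons_of_mem _ hh)
    by_cases hp : s = "P"
    · simp [classifyLoopA, hp, ih _ _ hrest, fwdP, List.count_cons]
    · by_cases hr : s = "R"
      · simp [classifyLoopA, hp, hr, ih _ _ hrest, fwdP, List.count_cons]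
      · by_cases hl : s = "PRlong"
        · have : pr + 1 + (rest.count "PRlong" : Int) = pr + ((rest.count "PRlong" : Int) + 1) := by ring
          simp [classifyLoopA, hp, hr, hl, ih _ _ hrest, fwdP, List.count_cons, this]
        · simp [classifyLoopA, hp, hr, hl, hs, ih _ _ hrest, fwdP, List.count_cons]

-- A's loop returns "mobitz_i" whenever "PRincrease" occurs
theorem loopA_inc (xs : List String) (pr cp : Int) (h : "PRincrease" ∈ xs) :
    classifyLoopA xs pr cp = "mobitz_i" := by
  induction xs generalizing pr cp with
  | nil => cases h
  | cons s rest ih =>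
    by_cases hs : s = "PRincrease"
    · have hp : s ≠ "P" := by simp [hs]
      have hr : s ≠ "R" := by simp [hs]
      have hl : s ≠ "PRlong" := by simp [hs]
      simp [classifyLoopA, hp, hr, hl, hs]
    · have hrest : "PRincrease" ∈ rest := by
        cases h with
        | head => exact absurd rfl hs
        | tail _ hh => exact hh
      by_cases hp : s = "P" <;> by_cases hr : s = "R" <;> by_cases hl : s = "PRlong" <;>
        simp [classifyLoopA, hp, hr, hl, hs, ih _ _ hrest]

-- ===== VERDICT (by name: the statement is the Claim_ definition above) =====
theorem classify_fsa_spec : Claim_equal_classify_fsa := by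
  intro sequence _
  unfold Spec_classify_fsa classify_fsa classify_fsa_alt
  by_cases hmem : "PRincrease" ∈ sequence
  · rw [loopA_inc _ _ _ hmem]
    simp [hmem]
  · rw [loopA_no_inc _ _ _ hmem, fwdP_eq_trailingP]
    have hc : sequence.contains "PRincrease" = false := by
      simpa [List.contains_eq_mem] using hmem
    simp only [hc, Bool.false_eq_true, if_false, PySem.List.count, zero_add]
    by_cases hm : "R" ∈ sequence <;> simp [hm]
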